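-- pv_equiv track=rewrite | github.com/zooniverse/aggregation | active_weather/kernel_smoothing.py | __upper_bounds__
-- ===== SOURCE A (Python) =====
-- def __upper_bounds__(line):
--     sorted_l = sorted(line, key = lambda l:l[0])
--
--     x_ret = []
--     y_ret = []
--
--     current_x = sorted_l[0][0]
--     current_y = -float("inf")
--
--     for x,y in sorted_l:
--         if x != current_x:
--             x_ret.append(current_x)
--             y_ret.append(current_y)
--             current_x = x
--             current_y = -float("inf")
--         current_y = max(current_y,y)
--
--     x_ret.append(current_x)
--     y_ret.append(current_y)
--
--     return x_ret,y_ret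
-- ===== SOURCE B (Python) =====
-- def __upper_bounds__(line):
--     best = {}
--     for x, y in line:
--         if x not in best or y > best[x]:
--             best[x] = y
--     xs = sorted(best)
--     ys = [best[x] for x in xs]
--     return xs, ys
-- ===== Notes on version B (the rewrite author's own statement) =====
-- stated objective: idiomatic
-- what changed: A sorts the whole list and runs an adjacency group-change scan over the sorted pairs; B makes one dict pass keeping the max y per x and then sorts only the distinct keys.
-- crash fix: On the empty list A raises IndexError at sorted_l[0]; B returns ([], []). — e.g. on __upper_bounds__([]): A raises IndexError, B returns ([], [])
import Mathlib
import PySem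

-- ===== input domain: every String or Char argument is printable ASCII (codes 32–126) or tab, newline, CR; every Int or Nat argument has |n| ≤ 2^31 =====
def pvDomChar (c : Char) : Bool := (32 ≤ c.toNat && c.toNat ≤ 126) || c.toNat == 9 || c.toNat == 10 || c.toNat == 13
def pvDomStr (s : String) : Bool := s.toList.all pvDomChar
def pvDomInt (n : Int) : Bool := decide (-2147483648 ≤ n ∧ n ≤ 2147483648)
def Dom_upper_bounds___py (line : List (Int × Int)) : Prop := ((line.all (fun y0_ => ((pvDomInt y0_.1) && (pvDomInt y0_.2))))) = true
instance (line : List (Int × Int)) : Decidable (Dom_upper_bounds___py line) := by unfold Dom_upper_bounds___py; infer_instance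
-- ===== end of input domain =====

-- B replaces A's sort-the-whole-list-then-adjacent-group scan by a single dict pass keeping the
-- max y per x, sorting only the distinct keys afterwards (idiomatic dict-of-maxima formulation).

-- ===== PORT A =====
-- current_y starts as -float("inf") and is only ever read after at least one max(current_y, y):
-- modelled as Option Int, none = -inf; pvAMax cy y = max(current_y, y) (always an int).
def pvAMax (cy : Option Int) (y : Int) : Option Int :=
  some (match cy with | none => y | some c => max c y)

-- the 'for x,y in sorted_l' loop with state (x_ret, y_ret, current_x, current_y),
-- including the trailing x_ret.append(current_x); y_ret.append(current_y).
-- cy.getD 0 is never the none case on inputs admitted by Pre_ (each appended group saw ≥ 1 y).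
def pvALoop : List (Int × Int) → List Int → List Int → Int → Option Int → List Int × List Int
  | [], xr, yr, cx, cy => (xr ++ [cx], yr ++ [cy.getD 0])
  | (x, y) :: t, xr, yr, cx, cy =>
    if x ≠ cx then pvALoop t (xr ++ [cx]) (yr ++ [cy.getD 0]) x (pvAMax none y)
    else pvALoop t xr yr cx (pvAMax cy y)

def upper_bounds___py (line : List (Int × Int)) : List Int × List Int :=
  match PySem.List.sorted line (fun l => l.1) false with
  | [] => ([], [])        -- sorted_l[0][0] raises IndexError here; excluded by Pre_
  | (x0, y0) :: rest => pvALoop ((x0, y0) :: rest) [] [] x0 none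

-- ===== PORT B =====
-- 'if x not in best or y > best[x]: best[x] = y' (best[x] only read when x is in best)
def pvBStep (d : PySem.Dict Int Int) (p : Int × Int) : PySem.Dict Int Int :=
  if d.contains p.1 = false then d.insert p.1 p.2
  else if d.getD p.1 0 < p.2 then d.insert p.1 p.2
  else d

def upper_bounds___py_alt (line : List (Int × Int)) : List Int × List Int :=
  let best := line.foldl pvBStep PySem.Dict.empty
  let xs := PySem.List.sorted (PySem.Dict.keys best) (fun x => x) false
  (xs, xs.map (fun x => best.getD x 0))

-- ===== PRECONDITION & SPEC =====
-- Pre_ excludes only the empty list, on which A raises IndexError at sorted_l[0].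
def Pre_upper_bounds___py (line : List (Int × Int)) : Prop := line ≠ []
instance (line : List (Int × Int)) : Decidable (Pre_upper_bounds___py line) := by
  unfold Pre_upper_bounds___py; infer_instance

def pvWitness_upper_bounds___py : (List (Int × Int)) := [(1, 2), (1, 5), (3, 4)]

-- On the empty list A raises IndexError (sorted_l[0]); B returns ([], []).
def Raises_upper_bounds___py (line : List (Int × Int)) : Prop := line = []
instance (line : List (Int × Int)) : Decidable (Raises_upper_bounds___py line) := by
  unfold Raises_upper_bounds___py; infer_instance
def pvRaiseWitness_upper_bounds___py : (List (Int × Int)) := []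
def pvRaiseWitnessOut_upper_bounds___py : List Int × List Int := ([], [])

def Spec_upper_bounds___py (line : List (Int × Int)) (out : List Int × List Int) : Prop :=
  out = upper_bounds___py_alt line
instance (line : List (Int × Int)) (out : List Int × List Int) :
    Decidable (Spec_upper_bounds___py line out) := by unfold Spec_upper_bounds___py; infer_instance

-- ===== CLAIM (what is proved, stated in full; the proofs are below) =====
def Claim_equal_upper_bounds___py : Prop :=
  ∀ (line : List (Int × Int)), Dom_upper_bounds___py line → Pre_upper_bounds___py line →
    Spec_upper_bounds___py line (upper_bounds___py line)

def Claim_raises_upper_bounds___py : Prop :=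
  (∀ (line : List (Int × Int)), Dom_upper_bounds___py line → Raises_upper_bounds___py line →
      ¬ Pre_upper_bounds___py line) ∧
  (Dom_upper_bounds___py (pvRaiseWitness_upper_bounds___py) ∧
   Raises_upper_bounds___py (pvRaiseWitness_upper_bounds___py) ∧
   upper_bounds___py_alt (pvRaiseWitness_upper_bounds___py) = pvRaiseWitnessOut_upper_bounds___py)

-- ===== LEMMAS AND PROOFS =====

-- the max-of-the-y's-with-first-component-x fold, starting from o
def pvMF (x : Int) (o : Option Int) (t : List (Int × Int)) : Option Int :=
  t.foldl (fun a p => if p.1 = x then pvAMax a p.2 else a) o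

lemma pvMF_nil (x : Int) (o : Option Int) : pvMF x o [] = o := rfl

lemma pvMF_cons (x : Int) (o : Option Int) (p : Int × Int) (t : List (Int × Int)) :
    pvMF x o (p :: t) = pvMF x (if p.1 = x then pvAMax o p.2 else o) t := rfl

lemma pvMF_of_not_mem (x : Int) (o : Option Int) (t : List (Int × Int))
    (h : ∀ p ∈ t, p.1 ≠ x) : pvMF x o t = o := by
  induction t generalizing o with
  | nil => rfl
  | cons p t ih =>
    rw [pvMF_cons, if_neg (h p (by simp)), ih _ (fun q hq => h q (by simp [hq]))]

lemma pvMF_perm (x : Int) (t t' : List (Int × Int)) (hp : t.Perm t') :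
    pvMF x none t = pvMF x none t' := by
  refine List.Perm.foldl_eq' hp ?_ none
  intro p _ q _ z
  by_cases hp1 : p.1 = x <;> by_cases hq1 : q.1 = x <;> simp [hp1, hq1] <;>
    cases z <;> simp [pvAMax, max_comm, max_left_comm]

lemma pvDedup_double (a : Int) (l : List Int) :
    PySem.List.dedup (a :: a :: l) = PySem.List.dedup (a :: l) := by
  simp only [PySem.List.dedup_eq_ofList, PySem.Set.ofList_cons]
  simp [PySem.Set.discard]

lemma pvDedup_not_mem (a : Int) (l : List Int) (h : a ∉ l) :
    PySem.List.dedup (a :: l) = a :: PySem.List.dedup l := by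
  simp only [PySem.List.dedup_eq_ofList, PySem.Set.ofList_cons]
  congr 1
  simp only [PySem.Set.discard]
  refine List.filter_eq_self.2 (fun b hb => ?_)
  have hbl : b ∈ l := (PySem.Set.mem_ofList (y := b) (xs := l)).1 hb
  simp only [Bool.not_eq_true', beq_eq_false_iff_ne, ne_eq]
  exact fun hba => h (hba ▸ hbl)

lemma pvMem_dedup (a : Int) (l : List Int) : a ∈ PySem.List.dedup l ↔ a ∈ l := by
  simp [PySem.List.dedup_eq_ofList, PySem.Set.mem_ofList]

-- the grouping scan of A on a sorted tail: accumulators are appended the dedup'd keys and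
-- their group maxima (the cx-group additionally folds from the pending cy)
lemma pvALoop_eq : ∀ (t : List (Int × Int)) (cx : Int) (cy : Option Int) (xr yr : List Int),
    (∀ p ∈ t, cx ≤ p.1) → t.Pairwise (fun a b => a.1 ≤ b.1) →
    pvALoop t xr yr cx cy =
      (xr ++ PySem.List.dedup (cx :: t.map Prod.fst),
       yr ++ (PySem.List.dedup (cx :: t.map Prod.fst)).map
         (fun x => (pvMF x (if x = cx then cy else none) t).getD 0)) := by
  intro t
  induction t with
  | nil =>
    intro cx cy xr yr _ _
    show (xr ++ [cx], yr ++ [cy.getD 0]) = _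
    have hd : PySem.List.dedup [cx] = [cx] := rfl
    rw [List.map_nil, hd]
    simp [pvMF_nil]
  | cons p t ih =>
    intro cx cy xr yr hle hpw
    obtain ⟨x, y⟩ := p
    by_cases hx : x = cx
    · subst hx
      rw [show pvALoop ((x, y) :: t) xr yr x cy = pvALoop t xr yr x (pvAMax cy y) by
        simp [pvALoop]]
      rw [ih x (pvAMax cy y) xr yr (fun q hq => (List.pairwise_cons.1 hpw).1 q hq)
        (List.pairwise_cons.1 hpw).2]
      rw [show ((x, y) :: t).map Prod.fst = x :: t.map Prod.fst by simp]
      rw [pvDedup_double]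
      refine Prod.ext rfl ?_
      dsimp only
      congr 1
      refine List.map_congr_left (fun z hz => ?_)
      by_cases hzx : z = x
      · subst hzx; rw [if_pos rfl, if_pos rfl, pvMF_cons, if_pos rfl]
      · rw [if_neg hzx, if_neg hzx, pvMF_cons, if_neg (fun h => hzx h.symm)]
    · have hlt : cx < x := lt_of_le_of_ne (hle (x, y) (by simp)) (Ne.symm hx)
      rw [show pvALoop ((x, y) :: t) xr yr cx cy
          = pvALoop t (xr ++ [cx]) (yr ++ [cy.getD 0]) x (pvAMax none y) by
        simp [pvALoop, hx]]
      rw [ih x (pvAMax none y) (xr ++ [cx]) (yr ++ [cy.getD 0])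
        (fun q hq => (List.pairwise_cons.1 hpw).1 q hq) (List.pairwise_cons.1 hpw).2]
      have hnm : cx ∉ (((x, y) :: t).map Prod.fst) := by
        intro hmem
        rcases List.mem_map.1 hmem with ⟨q, hq, hq1⟩
        rcases List.mem_cons.1 hq with h1 | h2
        · exact hx (by rw [h1] at hq1; simpa using hq1)
        · have h3 := (List.pairwise_cons.1 hpw).1 q h2
          simp only at h3
          omega
      rw [pvDedup_not_mem cx _ hnm]
      rw [show ((x, y) :: t).map Prod.fst = x :: t.map Prod.fst by simp]
      refine Prod.ext (by simp) ?_
      simp only [List.map_cons, List.append_assoc, List.singleton_append]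
      congr 1
      simp only [if_true]
      have hcx_not : ∀ q ∈ (x, y) :: t, q.1 ≠ cx := by
        intro q hq
        rcases List.mem_cons.1 hq with h1 | h2
        · rw [h1]; simpa using hx
        · have h3 := (List.pairwise_cons.1 hpw).1 q h2
          simp only at h3
          omega
      rw [pvMF_cons, if_neg (hcx_not (x, y) (by simp)),
        pvMF_of_not_mem cx cy t (fun q hq => hcx_not q (by simp [hq]))]
      congr 1
      refine List.map_congr_left (fun z hz => ?_)
      have hz_ne : z ≠ cx := by
        have hzmem : z ∈ x :: t.map Prod.fst := (pvMem_dedup z _).1 hz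
        rcases List.mem_cons.1 hzmem with h1 | h2
        · subst h1; exact hx
        · rcases List.mem_map.1 h2 with ⟨q, hq, hq1⟩
          subst hq1; exact hcx_not q (by simp [hq])
      rw [if_neg hz_ne]
      by_cases hzx : z = x
      · subst hzx; rw [if_pos rfl, pvMF_cons, if_pos rfl]
      · rw [if_neg hzx, pvMF_cons, if_neg (fun h => hzx h.symm)]

lemma pvB_keys : ∀ (l : List (Int × Int)) (d : PySem.Dict Int Int),
    (l.foldl pvBStep d).keys = PySem.Set.update d.keys (l.map Prod.fst) := by
  intro l
  induction l with
  | nil => intro d; simp [PySem.Set.update]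
  | cons p l ih =>
    intro d
    rw [List.foldl_cons, ih, List.map_cons, PySem.Set.update_cons]
    congr 1
    unfold pvBStep
    by_cases hc : d.contains p.1 = false
    · rw [if_pos hc, PySem.Dict.keys_insert_of_not_contains _ _ hc,
        PySem.Set.add_of_not_mem]
      intro hmem
      rw [← PySem.Dict.contains_iff_mem_keys _ _] at hmem
      rw [hc] at hmem; exact Bool.false_ne_true hmem
    · have hc' : d.contains p.1 = true := by revert hc; cases h : d.contains p.1 <;> simp
      have hmem : p.1 ∈ d.keys := (PySem.Dict.contains_iff_mem_keys _ _).1 hc'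
      rw [if_neg hc]
      by_cases hlt : d.getD p.1 0 < p.2
      · rw [if_pos hlt, PySem.Dict.keys_insert_of_contains _ _ hc',
          PySem.Set.add_of_mem hmem]
      · rw [if_neg hlt, PySem.Set.add_of_mem hmem]

lemma pvB_get : ∀ (l : List (Int × Int)) (d : PySem.Dict Int Int) (x : Int),
    (l.foldl pvBStep d).get? x = pvMF x (d.get? x) l := by
  intro l
  induction l with
  | nil => intro d x; rfl
  | cons p l ih =>
    intro d x
    rw [List.foldl_cons, ih, pvMF_cons]
    congr 1
    unfold pvBStep
    by_cases hpx : p.1 = x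
    · subst hpx
      rw [if_pos rfl]
      by_cases hc : d.contains p.1 = false
      · have hget : d.get? p.1 = none := by
          have := PySem.Dict.contains_eq_isSome_get? (d := d) (k := p.1)
          rw [hc] at this
          cases h : d.get? p.1 with
          | none => rfl
          | some v => rw [h] at this; simp at this
        rw [if_pos hc, PySem.Dict.get?_insert_self, hget]
        simp [pvAMax]
      · have hc' : d.contains p.1 = true := by revert hc; cases h : d.contains p.1 <;> simp
        obtain ⟨c, hcv⟩ : ∃ c, d.get? p.1 = some c := by
          have := PySem.Dict.contains_eq_isSome_get? (d := d) (k := p.1)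
          rw [hc'] at this
          cases h : d.get? p.1 with
          | none => rw [h] at this; simp at this
          | some v => exact ⟨v, rfl⟩
        have hgd : d.getD p.1 0 = c := by
          rw [PySem.Dict.getD_eq_get?_getD, hcv]; rfl
        rw [if_neg hc, hgd, hcv]
        by_cases hlt : c < p.2
        · rw [if_pos hlt, PySem.Dict.get?_insert_self]
          simp [pvAMax, max_eq_right (le_of_lt hlt)]
        · rw [if_neg hlt, hcv]
          simp [pvAMax, max_eq_left (le_of_not_gt hlt)]
    · rw [if_neg hpx]
      by_cases hc : d.contains p.1 = false
      · rw [if_pos hc, PySem.Dict.get?_insert_of_ne _ _ (fun h => hpx h.symm)]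
      · rw [if_neg hc]
        by_cases hlt : d.getD p.1 0 < p.2
        · rw [if_pos hlt, PySem.Dict.get?_insert_of_ne _ _ (fun h => hpx h.symm)]
        · rw [if_neg hlt]

-- ofList of a list is a sublist of it (dedup keeps first occurrences in order)
lemma pvOfList_sublist (l : List Int) : (PySem.Set.ofList l).Sublist l := by
  induction l with
  | nil => simp [PySem.Set.ofList]
  | cons a l ih =>
    rw [PySem.Set.ofList_cons]
    refine List.Sublist.cons₂ a (List.Sublist.trans ?_ ih)
    simp only [PySem.Set.discard]
    exact List.filter_sublist

-- ===== VERDICT (by name: the statement is the Claim_ definition above) =====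
lemma pvPairwise_lt_of_le_nodup (l : List Int) (h1 : l.Pairwise (· ≤ ·)) (h2 : l.Nodup) :
    l.Pairwise (· < ·) := by
  induction l with
  | nil => exact List.Pairwise.nil
  | cons a l ih =>
    rw [List.pairwise_cons] at h1 ⊢
    rw [List.nodup_cons] at h2
    refine ⟨fun b hb => lt_of_le_of_ne (h1.1 b hb) (fun he => h2.1 (he ▸ hb)), ?_⟩
    exact ih h1.2 h2.2

theorem upper_bounds___py_spec : Claim_equal_upper_bounds___py := by
  intro line _ hpre
  unfold Spec_upper_bounds___py
  cases hseq : PySem.List.sorted line (fun l => l.1) false with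
  | nil =>
    exact absurd ((PySem.List.sorted_eq_nil_iff _ _ _).1 hseq) hpre
  | cons p rest =>
    obtain ⟨x0, y0⟩ := p
    have hperm : ((x0, y0) :: rest).Perm line := by
      rw [← hseq]; exact PySem.List.sorted_perm _ _ _
    have hApw : ((x0, y0) :: rest).Pairwise (fun a b => a.1 ≤ b.1) := by
      rw [← hseq]; exact PySem.List.sorted_pairwise _ _
    have hle : ∀ q ∈ (x0, y0) :: rest, x0 ≤ q.1 := by
      intro q hq
      exact PySem.List.key_head_sorted_le _ _ hseq q (hperm.mem_iff.1 hq)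
    -- A's value via the loop characterisation
    have hA : upper_bounds___py line =
        (PySem.List.dedup (((x0, y0) :: rest).map Prod.fst),
         (PySem.List.dedup (((x0, y0) :: rest).map Prod.fst)).map
           (fun x => (pvMF x none ((x0, y0) :: rest)).getD 0)) := by
      unfold upper_bounds___py
      rw [hseq]
      show pvALoop ((x0, y0) :: rest) [] [] x0 none = _
      rw [pvALoop_eq _ _ _ _ _ hle hApw]
      rw [show ((x0, y0) :: rest).map Prod.fst = x0 :: rest.map Prod.fst from rfl]
      rw [pvDedup_double]
      simp [ite_self]
    -- B's pieces
    have hkeys : (line.foldl pvBStep PySem.Dict.empty).keys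
        = PySem.Set.ofList (line.map Prod.fst) := by
      rw [pvB_keys, PySem.Dict.keys_empty, PySem.Set.update_nil_left]
    have hKAeq : PySem.List.dedup (((x0, y0) :: rest).map Prod.fst)
        = PySem.Set.ofList (((x0, y0) :: rest).map Prod.fst) := by
      simp [PySem.List.dedup_eq_ofList]
    have hnodupKA : (PySem.List.dedup (((x0, y0) :: rest).map Prod.fst)).Nodup := by
      rw [hKAeq]; exact PySem.Set.nodup_ofList _
    have hpwKA : (PySem.List.dedup (((x0, y0) :: rest).map Prod.fst)).Pairwise (· < ·) := by
      refine pvPairwise_lt_of_le_nodup _ ?_ hnodupKA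
      have hmappw : (((x0, y0) :: rest).map Prod.fst).Pairwise (· ≤ ·) :=
        List.Pairwise.map Prod.fst (fun a b h => h) hApw
      exact hmappw.sublist (hKAeq ▸ pvOfList_sublist _)
    have hpermKA : (PySem.List.dedup (((x0, y0) :: rest).map Prod.fst)).Perm
        (line.foldl pvBStep PySem.Dict.empty).keys := by
      rw [hkeys, hKAeq]
      refine List.perm_of_nodup_nodup_toFinset_eq (PySem.Set.nodup_ofList _) (PySem.Set.nodup_ofList _) ?_
      ext z
      simp only [List.mem_toFinset, PySem.Set.mem_ofList]
      exact (hperm.map Prod.fst).mem_iff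
    have hxs : PySem.List.sorted (line.foldl pvBStep PySem.Dict.empty).keys
        (fun x => x) false = PySem.List.dedup (((x0, y0) :: rest).map Prod.fst) :=
      PySem.List.sorted_eq_of_perm_of_pairwise_lt _ _ _ hpermKA hpwKA
    have hval : ∀ x, (line.foldl pvBStep PySem.Dict.empty).getD x 0
        = (pvMF x none ((x0, y0) :: rest)).getD 0 := by
      intro x
      rw [PySem.Dict.getD_eq_get?_getD, pvB_get, PySem.Dict.get?_empty,
        ← pvMF_perm x _ _ hperm]
    rw [hA]
    unfold upper_bounds___py_alt
    simp only []
    rw [hxs]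
    exact Prod.ext rfl (List.map_congr_left (fun z _ => (hval z).symm))

@[simp] theorem upper_bounds___py_raises : Claim_raises_upper_bounds___py := by
  unfold Claim_raises_upper_bounds___py
  exact ⟨fun line _ h => by simpa [Pre_upper_bounds___py, Raises_upper_bounds___py] using h,
    by decide⟩
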